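-- pv_equiv track=rewrite | github.com/DaryaSinitsyna/Tasks_for_Tetrika | task_3/task_3.py | correct_list
-- ===== SOURCE A (Python) =====
-- def correct_list(intervals, lesson_start, lesson_end):
--     correct_intervals_list = []
--     for index in range(0, len(intervals), 2):
--
--         if intervals[index] > lesson_end:
--             break
--
--         if intervals[index + 1] < lesson_start:
--             continue
--
--         current_interval_start = max(intervals[index], lesson_start)
--
--         if correct_intervals_list:
--             current_interval_start = max(current_interval_start, correct_intervals_list[-1])
--
--         current_interval_end = min(intervals[index + 1], lesson_end)
--
--         if current_interval_start < current_interval_end: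
--             correct_intervals_list.extend([current_interval_start, current_interval_end])
--
--     return correct_intervals_list
-- ===== SOURCE B (Python) =====
-- def correct_list(intervals, lesson_start, lesson_end):
--     # Phase 1: collect clamped candidate intervals, stopping at the first
--     # pair that starts after the lesson end.
--     candidates = []
--     for i in range(0, len(intervals), 2):
--         if intervals[i] > lesson_end:
--             break
--         if intervals[i + 1] >= lesson_start:
--             candidates.append((max(intervals[i], lesson_start),
--                                min(intervals[i + 1], lesson_end)))
--     # Phase 2: clip each candidate against the previously emitted end.
--     result = []
--     prev_end = None
--     for cs, ce in candidates:
--         s = cs if prev_end is None else max(cs, prev_end)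
--         if s < ce:
--             result.extend([s, ce])
--             prev_end = ce
--     return result
-- ===== Notes on version B (the rewrite author's own statement) =====
-- stated objective: alternative
-- what changed: Splits A's single fused clamp-and-clip loop into two passes: a collect pass building a list of clamped candidate tuples (with the same early break), and a clip pass over that list maintaining prev_end instead of peeking at the output list's last element.
-- outside the precondition, e.g. on correct_list([1, 5, 7], 0, 10): A raises IndexError, B raises IndexError
import Mathlib
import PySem

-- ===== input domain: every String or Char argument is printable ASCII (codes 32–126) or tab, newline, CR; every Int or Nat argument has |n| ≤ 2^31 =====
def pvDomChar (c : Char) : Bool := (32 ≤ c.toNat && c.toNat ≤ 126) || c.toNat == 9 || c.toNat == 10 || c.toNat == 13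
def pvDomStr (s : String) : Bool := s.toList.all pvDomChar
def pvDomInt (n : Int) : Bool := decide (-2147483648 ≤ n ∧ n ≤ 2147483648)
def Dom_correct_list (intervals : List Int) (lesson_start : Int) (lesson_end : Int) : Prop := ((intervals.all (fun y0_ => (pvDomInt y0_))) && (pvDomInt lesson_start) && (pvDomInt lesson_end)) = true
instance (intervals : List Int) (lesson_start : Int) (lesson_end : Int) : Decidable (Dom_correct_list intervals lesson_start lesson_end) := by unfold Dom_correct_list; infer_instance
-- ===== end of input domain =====

-- B splits A's single fused clamp-and-clip loop into two passes (collect clamped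
-- candidates, then clip against prev_end); alternative decomposition, same cost.


-- ===== PORT A =====
-- A's loop over range(0, len, 2): scan the list two elements at a time,
-- carrying the output accumulator; `acc[-1]` is acc.getLast?.
-- The lone-element tail with head ≤ lesson_end is Python's IndexError
-- (excluded by Pre_); the port returns acc there.
def correct_list_loop (l : List Int) (lesson_start lesson_end : Int) (acc : List Int) : List Int :=
  match l with
  | a :: b :: rest =>
      if a > lesson_end then acc                                   -- break
      else if b < lesson_start then correct_list_loop rest lesson_start lesson_end acc  -- continue
      else
        let cs0 := max a lesson_start
        let cs := if acc ≠ [] then max cs0 (acc.getLast?.getD 0) else cs0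
        let ce := min b lesson_end
        if cs < ce then correct_list_loop rest lesson_start lesson_end (acc ++ [cs, ce])
        else correct_list_loop rest lesson_start lesson_end acc
  | [_] => acc   -- break if head > lesson_end, else IndexError (outside Pre_)
  | [] => acc

def correct_list (intervals : List Int) (lesson_start : Int) (lesson_end : Int) : List Int :=
  correct_list_loop intervals lesson_start lesson_end []

-- ===== PORT B =====
-- Phase 1: collect clamped candidates, with the same early break.
def collect_cands (l : List Int) (lesson_start lesson_end : Int) : List (Int × Int) :=
  match l with
  | a :: b :: rest =>
      if a > lesson_end then []
      else if b ≥ lesson_start then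
        (max a lesson_start, min b lesson_end) :: collect_cands rest lesson_start lesson_end
      else collect_cands rest lesson_start lesson_end
  | [_] => []    -- break if head > lesson_end, else IndexError (outside Pre_)
  | [] => []

-- Phase 2: clip each candidate against the previously emitted end.
def clip_cands (cands : List (Int × Int)) (prev_end : Option Int) (result : List Int) : List Int :=
  match cands with
  | [] => result
  | (cs, ce) :: rest =>
      let s := match prev_end with | none => cs | some p => max cs p
      if s < ce then clip_cands rest (some ce) (result ++ [s, ce])
      else clip_cands rest prev_end result

def correct_list_alt (intervals : List Int) (lesson_start : Int) (lesson_end : Int) : List Int :=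
  clip_cands (collect_cands intervals lesson_start lesson_end) none []

-- ===== PRECONDITION & SPEC =====
-- Pre_ excludes exactly the inputs on which Python A raises IndexError: an
-- odd-length list reaching the lone last element (no earlier even-indexed
-- start exceeds lesson_end).
def Pre_correct_list (intervals : List Int) (lesson_start : Int) (lesson_end : Int) : Prop :=
  intervals.length % 2 = 0 ∨
    ∃ i ∈ List.range intervals.length, i % 2 = 0 ∧ intervals.getD i 0 > lesson_end

instance (intervals : List Int) (lesson_start : Int) (lesson_end : Int) : Decidable (Pre_correct_list intervals lesson_start lesson_end) := by unfold Pre_correct_list; infer_instance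

def pvWitness_correct_list : List Int × Int × Int := ([1, 4, 6, 10], 2, 8)

def Spec_correct_list (intervals : List Int) (lesson_start : Int) (lesson_end : Int) (out : List Int) : Prop := out = correct_list_alt intervals lesson_start lesson_end
instance (intervals : List Int) (lesson_start : Int) (lesson_end : Int) (out : List Int) : Decidable (Spec_correct_list intervals lesson_start lesson_end out) := by unfold Spec_correct_list; infer_instance

-- ===== CLAIM (what is proved, stated in full; the proofs are below) =====
def Claim_equal_correct_list : Prop := ∀ (intervals : List Int) (lesson_start : Int) (lesson_end : Int), Dom_correct_list intervals lesson_start lesson_end → Pre_correct_list intervals lesson_start lesson_end → Spec_correct_list intervals lesson_start lesson_end (correct_list intervals lesson_start lesson_end)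

-- ===== LEMMAS AND PROOFS =====

-- A's fused loop equals B's two phases, for any accumulator whose last
-- element plays the role of prev_end.
lemma loop_eq_phases (l : List Int) (ls le : Int) (acc : List Int) :
    correct_list_loop l ls le acc = clip_cands (collect_cands l ls le) acc.getLast? acc := by
  fun_induction correct_list_loop l ls le acc with
  | case1 acc a b rest hgt =>
      simp [collect_cands, hgt, clip_cands]
  | case2 acc a b rest hgt hlt ih =>
      simp only [if_neg hgt, collect_cands]
      rw [if_neg (by omega : ¬ b ≥ ls)]
      exact ih
  | case3 acc a b rest hgt hlt cs0 cs ce hemit ih =>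
      simp only [cs0, cs, ce] at hemit ih ⊢
      have hcs : (if acc ≠ [] then max (max a ls) (acc.getLast?.getD 0) else max a ls)
               = (match acc.getLast? with | none => max a ls | some p => max (max a ls) p) := by
        cases hacc : acc.getLast? with
        | none => simp [List.getLast?_eq_none_iff.mp hacc]
        | some p =>
            have hne : acc ≠ [] := by intro h; rw [h] at hacc; simp at hacc
            simp [hne, hacc]
      simp only [if_neg hgt, collect_cands]
      rw [if_pos (by omega : b ≥ ls)]
      simp only [clip_cands]
      rw [← hcs, if_pos hemit, ih]
      simp
  | case4 acc a b rest hgt hlt cs0 cs ce hemit ih =>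
      simp only [cs0, cs, ce] at hemit ih ⊢
      have hcs : (if acc ≠ [] then max (max a ls) (acc.getLast?.getD 0) else max a ls)
               = (match acc.getLast? with | none => max a ls | some p => max (max a ls) p) := by
        cases hacc : acc.getLast? with
        | none => simp [List.getLast?_eq_none_iff.mp hacc]
        | some p =>
            have hne : acc ≠ [] := by intro h; rw [h] at hacc; simp at hacc
            simp [hne, hacc]
      simp only [if_neg hgt, collect_cands]
      rw [if_pos (by omega : b ≥ ls)]
      simp only [clip_cands]
      rw [← hcs, if_neg hemit]
      exact ih
  | case5 acc head => simp [collect_cands, clip_cands]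
  | case6 acc => simp [collect_cands, clip_cands]

-- ===== VERDICT (by name: the statement is the Claim_ definition above) =====
theorem correct_list_spec : Claim_equal_correct_list := by
  intro intervals ls le _ _
  unfold Spec_correct_list correct_list correct_list_alt
  simpa using loop_eq_phases intervals ls le []
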